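-- pv_equiv track=rewrite | github.com/ManiAm/GNS-Sonic-LLDP-Discover | model.py | detect_anomalous_ports
-- ===== SOURCE A (Python) =====
-- from collections import defaultdict
--
-- def detect_anomalous_ports(raw_edges):
--     """
--     Detect ports that see multiple remote devices.
--
--     This indicates shared segments, hub flooding, or network anomalies.
--
--     Args:
--         raw_edges: List of raw edges from LLDP data.
--
--     Returns:
--         Set of (device, port) tuples that see multiple neighbors.
--     """
--
--     per_dev_port_remotes = defaultdict(lambda: defaultdict(set))
--     for a_dev, a_port, b_dev, _b_port in raw_edges:
--         per_dev_port_remotes[a_dev][a_port].add(b_dev)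
--
--     anomalous = set()
--     for dev, ports in per_dev_port_remotes.items():
--         for lp, rems in ports.items():
--             if len(rems) > 1:
--                 anomalous.add((dev, lp))
--     return anomalous
-- ===== SOURCE B (Python) =====
-- def detect_anomalous_ports(raw_edges):
--     """
--     Detect ports that see multiple remote devices.
--
--     Group the edges once into a flat per-device list, then for each device
--     enumerate its distinct ports and rescan that device's list: a port is
--     anomalous when some remote on it differs from the first remote seen there.
--     No per-port sets or counters are kept.
--     """
--     by_dev = {}
--     for a_dev, a_port, b_dev, _b_port in raw_edges:
--         by_dev.setdefault(a_dev, []).append((a_port, b_dev))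
--
--     anomalous = set()
--     for dev, pairs in by_dev.items():
--         ports = []
--         for p, _ in pairs:
--             if p not in ports:
--                 ports.append(p)
--         for port in ports:
--             remotes = [b for p, b in pairs if p == port]
--             if any(b != remotes[0] for b in remotes):
--                 anomalous.add((dev, port))
--     return anomalous
-- ===== Notes on version B (the rewrite author's own statement) =====
-- stated objective: alternative
-- what changed: A accumulates a nested defaultdict of per-port remote-device sets and then scans it counting set sizes; B groups the edges once into a flat per-device list and, for each device, enumerates its distinct ports and rescans that device's own list, flagging a port when some remote on it differs from the first remote seen there - no per-port sets or counters are kept.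
import Mathlib
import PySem

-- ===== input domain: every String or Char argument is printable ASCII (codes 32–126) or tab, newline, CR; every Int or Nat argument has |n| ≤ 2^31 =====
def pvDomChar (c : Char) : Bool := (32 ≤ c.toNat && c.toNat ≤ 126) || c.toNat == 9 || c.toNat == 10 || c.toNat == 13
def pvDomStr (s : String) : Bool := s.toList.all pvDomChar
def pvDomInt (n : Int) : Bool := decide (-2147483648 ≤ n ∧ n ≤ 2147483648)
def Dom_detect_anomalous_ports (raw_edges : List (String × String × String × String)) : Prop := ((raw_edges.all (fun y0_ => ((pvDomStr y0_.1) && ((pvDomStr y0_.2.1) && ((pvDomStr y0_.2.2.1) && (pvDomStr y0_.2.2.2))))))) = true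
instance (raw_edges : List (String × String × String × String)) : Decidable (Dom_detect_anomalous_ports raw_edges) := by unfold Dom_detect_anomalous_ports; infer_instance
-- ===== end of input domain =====

-- B replaces A's nested defaultdict of per-port remote sets by a single flat grouping of the
-- edges per device followed by per-device rescans comparing each remote to the first (objective: alternative).

-- ===== PORT A =====
-- per_dev_port_remotes[a_dev][a_port].add(b_dev)  (defaultdict: missing levels spring into existence)
def pvStepA (d : PySem.Dict String (PySem.Dict String (PySem.Set String)))
    (e : String × String × String × String) : PySem.Dict String (PySem.Dict String (PySem.Set String)) :=
  d.insert e.1 ((d.getD e.1 PySem.Dict.empty).insert e.2.1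
    (PySem.Set.add ((d.getD e.1 PySem.Dict.empty).getD e.2.1 PySem.Set.empty) e.2.2.1))

def detect_anomalous_ports (raw_edges : List (String × String × String × String)) : List (String × String) :=
  let per_dev_port_remotes := raw_edges.foldl pvStepA PySem.Dict.empty
  per_dev_port_remotes.items.foldl (fun anomalous dp =>
    dp.2.items.foldl (fun anomalous pr =>
      if 1 < PySem.Set.len pr.2 then PySem.Set.add anomalous (dp.1, pr.1) else anomalous)
      anomalous)
    PySem.Set.empty

-- ===== PORT B =====
-- by_dev.setdefault(a_dev, []).append((a_port, b_dev))  — d[k] = f(d.get(k, [])) is Dict.modify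
def pvGroupB (d : PySem.Dict String (List (String × String)))
    (e : String × String × String × String) : PySem.Dict String (List (String × String)) :=
  PySem.Dict.modify d e.1 [] (fun l => l ++ [(e.2.1, e.2.2.1)])

def detect_anomalous_ports_alt (raw_edges : List (String × String × String × String)) : List (String × String) :=
  let by_dev := raw_edges.foldl pvGroupB PySem.Dict.empty
  by_dev.items.foldl (fun anomalous dp =>
    -- ports: the device's distinct ports in first-seen order
    let ports := dp.2.foldl (fun ps q => if ps.contains q.1 then ps else ps ++ [q.1]) []
    ports.foldl (fun anomalous port =>
      let remotes := (dp.2.filter (fun q => q.1 == port)).map (fun q => q.2)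
      -- remotes is nonempty for every port of the device; the [] branch is unreachable
      -- (Python's remotes[0] would raise IndexError only there)
      match remotes with
      | [] => anomalous
      | r0 :: _ =>
          if remotes.any (fun b => b != r0) then PySem.Set.add anomalous (dp.1, port) else anomalous)
      anomalous)
    PySem.Set.empty

-- ===== PRECONDITION & SPEC =====
def Spec_detect_anomalous_ports (raw_edges : List (String × String × String × String)) (out : List (String × String)) : Prop := out = detect_anomalous_ports_alt raw_edges
instance (raw_edges : List (String × String × String × String)) (out : List (String × String)) : Decidable (Spec_detect_anomalous_ports raw_edges out) := by unfold Spec_detect_anomalous_ports; infer_instance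

-- ===== CLAIM (what is proved, stated in full; the proofs are below) =====
def Claim_equal_detect_anomalous_ports : Prop := ∀ (raw_edges : List (String × String × String × String)), Dom_detect_anomalous_ports raw_edges → Spec_detect_anomalous_ports raw_edges (detect_anomalous_ports raw_edges)

-- ===== LEMMAS AND PROOFS =====

-- the (port, remote) occurrences of one device, in edge order
def pvPairs (raw_edges : List (String × String × String × String)) (dev : String) : List (String × String) :=
  (raw_edges.filter (fun e => e.1 == dev)).map (fun e => (e.2.1, e.2.2.1))

-- the remotes of one port of a device, in order
def pvRemotes (pairs : List (String × String)) (port : String) : List String :=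
  (pairs.filter (fun q => q.1 == port)).map (fun q => q.2)

-- A's inner dict for one device, as a function of that device's pair list
def pvInnerStep (m : PySem.Dict String (PySem.Set String)) (q : String × String) :
    PySem.Dict String (PySem.Set String) :=
  m.insert q.1 (PySem.Set.add (m.getD q.1 PySem.Set.empty) q.2)

theorem pvA_getD (l : List (String × String × String × String))
    (d : PySem.Dict String (PySem.Dict String (PySem.Set String))) (dev : String) :
    (l.foldl pvStepA d).getD dev PySem.Dict.empty
      = (pvPairs l dev).foldl pvInnerStep (d.getD dev PySem.Dict.empty) := by
  induction l generalizing d with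
  | nil => rfl
  | cons e t ih =>
      simp only [List.foldl_cons]
      rw [ih]
      by_cases h : e.1 = dev
      · have h1 : (pvStepA d e).getD dev PySem.Dict.empty
            = pvInnerStep (d.getD dev PySem.Dict.empty) (e.2.1, e.2.2.1) := by
          simp [pvStepA, h, pvInnerStep]
        have h2 : pvPairs (e :: t) dev = (e.2.1, e.2.2.1) :: pvPairs t dev := by
          simp [pvPairs, h]
        rw [h1, h2, List.foldl_cons]
      · have h1 : (pvStepA d e).getD dev PySem.Dict.empty = d.getD dev PySem.Dict.empty := by
          simp [pvStepA, PySem.Dict.getD_insert, Ne.symm h]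
        have h2 : pvPairs (e :: t) dev = pvPairs t dev := by
          simp [pvPairs, h]
        rw [h1, h2]

theorem pvB_getD (raw_edges : List (String × String × String × String)) (dev : String) :
    (raw_edges.foldl pvGroupB PySem.Dict.empty).getD dev [] = pvPairs raw_edges dev := by
  have h0 : raw_edges.foldl pvGroupB PySem.Dict.empty
      = (raw_edges.map (fun e => (e.1, (e.2.1, e.2.2.1)))).foldl
          (fun d p => PySem.Dict.modify d p.1 [] (fun l => l ++ [p.2])) PySem.Dict.empty := by
    rw [List.foldl_map]; rfl
  rw [h0, PySem.Dict.getD_foldl_modify_append, PySem.Dict.getD_empty]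
  unfold pvPairs
  rw [List.filter_map, List.map_map]
  rfl

theorem pvA_keys (raw_edges : List (String × String × String × String)) :
    (raw_edges.foldl pvStepA PySem.Dict.empty).keys
      = PySem.Set.ofList (raw_edges.map (fun e => e.1)) := by
  unfold pvStepA
  rw [PySem.Dict.keys_foldl_insert_key raw_edges (fun e => e.1)
    (fun d e => ((d.getD e.1 PySem.Dict.empty).insert e.2.1
      (PySem.Set.add ((d.getD e.1 PySem.Dict.empty).getD e.2.1 PySem.Set.empty) e.2.2.1)))
    PySem.Dict.empty, PySem.Dict.keys_empty, PySem.Set.update_nil_left]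

theorem pvB_keys (raw_edges : List (String × String × String × String)) :
    (raw_edges.foldl pvGroupB PySem.Dict.empty).keys
      = PySem.Set.ofList (raw_edges.map (fun e => e.1)) := by
  unfold pvGroupB
  rw [PySem.Dict.keys_foldl_modify_key raw_edges (fun e => e.1) [] 
    (fun d e => (fun l => l ++ [(e.2.1, e.2.2.1)]))
    PySem.Dict.empty, PySem.Dict.keys_empty, PySem.Set.update_nil_left]

theorem pvA_nodup (raw_edges : List (String × String × String × String)) :
    (raw_edges.foldl pvStepA PySem.Dict.empty).keys.Nodup := by
  rw [pvA_keys]; exact PySem.Set.nodup_ofList _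

theorem pvB_nodup (raw_edges : List (String × String × String × String)) :
    (raw_edges.foldl pvGroupB PySem.Dict.empty).keys.Nodup := by
  rw [pvB_keys]; exact PySem.Set.nodup_ofList _

theorem pvInner_getD (pairs : List (String × String)) (m : PySem.Dict String (PySem.Set String))
    (port : String) :
    (pairs.foldl pvInnerStep m).getD port PySem.Set.empty
      = (pvRemotes pairs port).foldl PySem.Set.add (m.getD port PySem.Set.empty) := by
  induction pairs generalizing m with
  | nil => rfl
  | cons q t ih =>
      simp only [List.foldl_cons]
      rw [ih]
      by_cases h : q.1 = port
      · have h1 : (pvInnerStep m q).getD port PySem.Set.empty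
            = PySem.Set.add (m.getD port PySem.Set.empty) q.2 := by
          simp [pvInnerStep, h]
        have h2 : pvRemotes (q :: t) port = q.2 :: pvRemotes t port := by
          simp [pvRemotes, h]
        rw [h1, h2, List.foldl_cons]
      · have h1 : (pvInnerStep m q).getD port PySem.Set.empty = m.getD port PySem.Set.empty := by
          simp [pvInnerStep, PySem.Dict.getD_insert, Ne.symm h]
        have h2 : pvRemotes (q :: t) port = pvRemotes t port := by
          simp [pvRemotes, h]
        rw [h1, h2]

theorem pvInner_keys (pairs : List (String × String)) :
    (pairs.foldl pvInnerStep PySem.Dict.empty).keys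
      = PySem.Set.ofList (pairs.map (fun q => q.1)) := by
  unfold pvInnerStep
  rw [PySem.Dict.keys_foldl_insert_key pairs (fun q => q.1)
    (fun m q => PySem.Set.add (m.getD q.1 PySem.Set.empty) q.2)
    PySem.Dict.empty, PySem.Dict.keys_empty, PySem.Set.update_nil_left]

theorem pvInner_nodup (pairs : List (String × String)) :
    (pairs.foldl pvInnerStep PySem.Dict.empty).keys.Nodup := by
  rw [pvInner_keys]; exact PySem.Set.nodup_ofList _

theorem pvInner_items (pairs : List (String × String)) :
    (pairs.foldl pvInnerStep PySem.Dict.empty).items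
      = (PySem.Set.ofList (pairs.map (fun q => q.1))).map
          (fun p => (p, PySem.Set.ofList (pvRemotes pairs p))) := by
  rw [PySem.Dict.items_eq_map_keys _ (pvInner_nodup pairs) PySem.Set.empty, pvInner_keys]
  apply List.map_congr_left
  intro p _
  rw [pvInner_getD, PySem.Dict.getD_empty]
  rw [PySem.Set.ofList_eq_foldl]
  rfl

-- all elements equal the seed: adding them changes nothing
theorem pv_fold_add_const (rest : List String) (r0 : String) (h : ∀ b ∈ rest, b = r0) :
    rest.foldl PySem.Set.add [r0] = [r0] := by
  induction rest with
  | nil => rfl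
  | cons b t ih =>
      have hb : b = r0 := h b (by simp)
      have h1 : PySem.Set.add [r0] b = [r0] := by
        rw [hb]; exact PySem.Set.add_of_mem (by simp)
      rw [List.foldl_cons, h1]
      exact ih (fun c hc => h c (by simp [hc]))

theorem pv_len_iff_any (r0 : String) (rest : List String) :
    1 < PySem.Set.len (PySem.Set.ofList (r0 :: rest))
      ↔ ((r0 :: rest).any (fun b => b != r0)) = true := by
  constructor
  · intro h1
    by_contra hany
    have hall : ∀ b ∈ rest, b = r0 := by
      intro b hb
      by_contra hbne
      exact hany (List.any_eq_true.mpr ⟨b, by simp [hb], by simp [hbne]⟩)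
    have hone : PySem.Set.ofList (r0 :: rest) = [r0] := by
      rw [PySem.Set.ofList_eq_foldl, List.foldl_cons]
      exact pv_fold_add_const rest r0 hall
    rw [hone] at h1
    simp [PySem.Set.len] at h1
  · intro h2
    obtain ⟨b, hb, hbneq⟩ := List.any_eq_true.mp h2
    have hbne : b ≠ r0 := by simpa using hbneq
    have hbmem : b ∈ PySem.Set.ofList (r0 :: rest) := (PySem.Set.mem_ofList _ _).mpr hb
    have hr0 : r0 ∈ PySem.Set.ofList (r0 :: rest) := (PySem.Set.mem_ofList _ _).mpr (by simp)
    rcases hs : PySem.Set.ofList (r0 :: rest) with _ | ⟨x, _ | ⟨y, t⟩⟩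
    · rw [hs] at hr0; simp at hr0
    · rw [hs] at hr0 hbmem
      simp only [List.mem_singleton] at hr0 hbmem
      exact absurd (hbmem.trans hr0.symm) hbne
    · simp [PySem.Set.len]

-- B's distinct-port loop is set(pairs.map fst) in first-seen order
theorem pv_ports_eq (pairs : List (String × String)) :
    pairs.foldl (fun ps q => if ps.contains q.1 then ps else ps ++ [q.1]) []
      = PySem.Set.ofList (pairs.map (fun q => q.1)) := by
  have h0 : ∀ (ps : List String) (q : String × String),
      (if ps.contains q.1 then ps else ps ++ [q.1]) = PySem.Set.add ps q.1 := by
    intro ps q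
    rw [PySem.Set.add_eq_ite]
    by_cases hm : q.1 ∈ ps <;> simp [hm]
  simp only [h0]
  rw [PySem.Set.ofList_eq_foldl, ← List.foldl_map]

-- the two per-device emission loops coincide
theorem pv_emit_dev (dev : String) (pairs : List (String × String))
    (acc : PySem.Set (String × String)) :
    (pairs.foldl pvInnerStep PySem.Dict.empty).items.foldl
        (fun anomalous pr =>
          if 1 < PySem.Set.len pr.2 then PySem.Set.add anomalous (dev, pr.1) else anomalous) acc
      = (pairs.foldl (fun ps q => if ps.contains q.1 then ps else ps ++ [q.1]) []).foldl
          (fun anomalous port =>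
            match (pairs.filter (fun q => q.1 == port)).map (fun q => q.2) with
            | [] => anomalous
            | r0 :: _ =>
                if ((pairs.filter (fun q => q.1 == port)).map (fun q => q.2)).any
                    (fun b => b != r0) then
                  PySem.Set.add anomalous (dev, port)
                else anomalous) acc := by
  rw [pvInner_items, List.foldl_map, pv_ports_eq]
  apply PySem.List.foldl_congr_mem
  intro acc' p hp
  have hpm : p ∈ pairs.map (fun q => q.1) := (PySem.Set.mem_ofList _ _).mp hp
  obtain ⟨q, hq, hq1⟩ := List.mem_map.mp hpm
  have hqf : q ∈ pairs.filter (fun q => q.1 == p) := List.mem_filter.mpr ⟨hq, by simp [hq1]⟩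
  have hne : (pairs.filter (fun q => q.1 == p)).map (fun q => q.2) ≠ [] := by
    intro hnil
    rw [List.map_eq_nil_iff] at hnil
    rw [hnil] at hqf
    simp at hqf
  simp only [pvRemotes]
  cases hrem : (pairs.filter (fun q => q.1 == p)).map (fun q => q.2) with
  | nil => exact absurd hrem hne
  | cons r0 rest =>
      by_cases hx : ((r0 :: rest).any (fun b => b != r0)) = true
      · rw [if_pos ((pv_len_iff_any r0 rest).mpr hx)]
        simp [hx]
      · rw [if_neg (fun hl => hx ((pv_len_iff_any r0 rest).mp hl))]
        simp [hx]

-- ===== VERDICT (by name: the statement is the Claim_ definition above) =====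
theorem detect_anomalous_ports_spec : Claim_equal_detect_anomalous_ports := by
  intro raw_edges _
  unfold Spec_detect_anomalous_ports
  simp only [detect_anomalous_ports, detect_anomalous_ports_alt]
  rw [PySem.Dict.items_eq_map_keys _ (pvA_nodup raw_edges) PySem.Dict.empty,
      PySem.Dict.items_eq_map_keys _ (pvB_nodup raw_edges) ([] : List (String × String)),
      pvA_keys, pvB_keys, List.foldl_map, List.foldl_map]
  apply PySem.List.foldl_congr_mem
  intro acc dev _
  rw [pvA_getD, PySem.Dict.getD_empty, pvB_getD]
  exact pv_emit_dev dev (pvPairs raw_edges dev) acc
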